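-- pv_equiv track=rewrite | github.com/dimoraws/pyton_noob_code | 5urok.py | calc_days_for_visits
-- ===== SOURCE A (Python) =====
-- schengen_constraint = 180
--
-- def get_visit_length(visit):
--   return visit[1] - visit[0] + 1
--
-- def calc_days_for_visits(visits):
--   days_for_visits = []
--   for visit in visits:
--       days_for_visit = 0
--       for past_visit in visits:
--           if visit[0] - schengen_constraint < past_visit[0] < visit[0]:
--               days_for_visit += get_visit_length(past_visit)
--       days_for_visit += get_visit_length(visit)
--       days_for_visits.append(days_for_visit)
--   return days_for_visits
-- ===== SOURCE B (Python) =====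
-- schengen_constraint = 180
--
-- def calc_days_for_visits(visits):
--     # sort by start, prefix sums over lengths, binary search per visit: O(n log n)
--     ordered = sorted(visits, key=lambda v: v[0])
--     starts = [v[0] for v in ordered]
--     prefix = [0]
--     total = 0
--     for s, e in ordered:
--         total += e - s + 1
--         prefix.append(total)
--
--     def bisect_left(a, x):
--         # standard bisect.bisect_left (bisect may not be imported here)
--         lo, hi = 0, len(a)
--         while lo < hi:
--             mid = (lo + hi) // 2
--             if a[mid] < x:
--                 lo = mid + 1
--             else:
--                 hi = mid
--         return lo
--
--     out = []
--     for s, e in visits: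
--         lo = bisect_left(starts, s - schengen_constraint + 1)
--         hi = bisect_left(starts, s)
--         out.append(prefix[hi] - prefix[lo] + (e - s + 1))
--     return out
-- ===== Notes on version B (the rewrite author's own statement) =====
-- stated objective: faster
-- what changed: Replaces the quadratic all-pairs inner scan by sorting the visits by start once, building a prefix-sum array of visit lengths, and answering each visit's 180-day window with two binary searches.
import Mathlib
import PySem

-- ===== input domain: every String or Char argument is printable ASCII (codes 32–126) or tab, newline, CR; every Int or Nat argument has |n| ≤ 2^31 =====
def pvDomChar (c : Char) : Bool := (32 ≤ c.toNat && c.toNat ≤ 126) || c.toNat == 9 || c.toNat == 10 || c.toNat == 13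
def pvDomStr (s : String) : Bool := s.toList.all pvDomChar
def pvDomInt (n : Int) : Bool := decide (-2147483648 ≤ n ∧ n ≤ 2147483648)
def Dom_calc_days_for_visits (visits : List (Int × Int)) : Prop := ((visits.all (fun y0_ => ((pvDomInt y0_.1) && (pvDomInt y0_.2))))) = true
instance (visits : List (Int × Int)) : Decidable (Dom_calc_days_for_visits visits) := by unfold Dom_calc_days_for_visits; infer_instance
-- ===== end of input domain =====

-- B replaces A's quadratic all-pairs scan by sort + prefix sums + two binary searches per visit (faster, O(n log n)).

-- ===== PORT A =====
def schengen_constraint : Int := 180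

def get_visit_length (visit : Int × Int) : Int := visit.2 - visit.1 + 1

def calc_days_for_visits (visits : List (Int × Int)) : List Int :=
  visits.foldl (fun days_for_visits visit =>
    let days_for_visit :=
      visits.foldl (fun days_for_visit past_visit =>
        if visit.1 - schengen_constraint < past_visit.1 ∧ past_visit.1 < visit.1 then
          days_for_visit + get_visit_length past_visit
        else days_for_visit) 0
    days_for_visits ++ [days_for_visit + get_visit_length visit]) []

-- ===== PORT B =====
-- transliteration of Source B: sort by start, prefix sums (running total), bisect_left
-- (hand-written bisect_left in Source B is the standard bisect.bisect_left → PySem.List.bisectLeft);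
-- prefix[hi]/prefix[lo] use getD 0, exact because bisectLeft ≤ length starts < length prefix.
def calc_days_for_visits_alt (visits : List (Int × Int)) : List Int :=
  let ordered := PySem.List.sorted visits (fun (v : Int × Int) => v.1)
  let starts := ordered.map (fun (v : Int × Int) => v.1)
  let pfx :=
    (ordered.foldl (fun (acc : List Int × Int) v =>
        (acc.1 ++ [acc.2 + (v.2 - v.1 + 1)], acc.2 + (v.2 - v.1 + 1))) ([0], 0)).1
  visits.foldl (fun out v =>
    let lo := PySem.List.bisectLeft starts (v.1 - schengen_constraint + 1)
    let hi := PySem.List.bisectLeft starts v.1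
    out ++ [pfx.getD hi 0 - pfx.getD lo 0 + (v.2 - v.1 + 1)]) []

-- ===== PRECONDITION & SPEC =====
def Spec_calc_days_for_visits (visits : List (Int × Int)) (out : List Int) : Prop := out = calc_days_for_visits_alt visits
instance (visits : List (Int × Int)) (out : List Int) : Decidable (Spec_calc_days_for_visits visits out) := by unfold Spec_calc_days_for_visits; infer_instance

-- ===== CLAIM (what is proved, stated in full; the proofs are below) =====
def Claim_equal_calc_days_for_visits : Prop := ∀ (visits : List (Int × Int)), Dom_calc_days_for_visits visits → Spec_calc_days_for_visits visits (calc_days_for_visits visits)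

-- ===== LEMMAS AND PROOFS =====

-- let-free views of the two ports
theorem calcA_eq (visits : List (Int × Int)) :
    calc_days_for_visits visits =
      visits.foldl (fun days_for_visits visit =>
        days_for_visits ++
          [visits.foldl (fun d pv =>
              if visit.1 - schengen_constraint < pv.1 ∧ pv.1 < visit.1 then
                d + get_visit_length pv
              else d) 0 + get_visit_length visit]) [] := rfl

theorem calcB_eq (visits : List (Int × Int)) :
    calc_days_for_visits_alt visits =
      visits.foldl (fun out v =>
        out ++ [((PySem.List.sorted visits (fun (v : Int × Int) => v.1)).foldl
                    (fun (acc : List Int × Int) v =>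
                      (acc.1 ++ [acc.2 + (v.2 - v.1 + 1)], acc.2 + (v.2 - v.1 + 1))) ([0], 0)).1.getD
                  (PySem.List.bisectLeft ((PySem.List.sorted visits (fun (v : Int × Int) => v.1)).map (fun (v : Int × Int) => v.1)) v.1) 0 -
                (((PySem.List.sorted visits (fun (v : Int × Int) => v.1)).foldl
                    (fun (acc : List Int × Int) v =>
                      (acc.1 ++ [acc.2 + (v.2 - v.1 + 1)], acc.2 + (v.2 - v.1 + 1))) ([0], 0)).1.getD
                  (PySem.List.bisectLeft ((PySem.List.sorted visits (fun (v : Int × Int) => v.1)).map (fun (v : Int × Int) => v.1)) (v.1 - schengen_constraint + 1)) 0) +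
                (v.2 - v.1 + 1)]) [] := rfl

-- the inner loop of A is a filtered sum
theorem pv_inner_sum (s : Int) (l : List (Int × Int)) (d : Int) :
    l.foldl (fun d pv =>
        if s - schengen_constraint < pv.1 ∧ pv.1 < s then d + get_visit_length pv else d) d
      = d + ((l.filter (fun pv => decide (s - schengen_constraint < pv.1 ∧ pv.1 < s))).map get_visit_length).sum := by
  induction l generalizing d with
  | nil => simp
  | cons h t ih =>
    by_cases hc : s - schengen_constraint < h.1 ∧ h.1 < s <;>
      simp [List.foldl, hc, ih] <;> try ring

-- the running-total prefix list, named for the proofs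
def pvPartials : List (Int × Int) → Int → List Int
  | [], _ => []
  | v :: vs, t => (t + get_visit_length v) :: pvPartials vs (t + get_visit_length v)

theorem foldl_prefix (l : List (Int × Int)) (acc : List Int) (t : Int) :
    (l.foldl (fun (acc : List Int × Int) v =>
        (acc.1 ++ [acc.2 + (v.2 - v.1 + 1)], acc.2 + (v.2 - v.1 + 1))) (acc, t)).1
      = acc ++ pvPartials l t := by
  induction l generalizing acc t with
  | nil => simp [pvPartials]
  | cons h tl ih => simp [List.foldl, pvPartials, ih, get_visit_length]

theorem partials_getD (l : List (Int × Int)) (t : Int) (k : Nat) (hk : k < l.length) :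
    (pvPartials l t).getD k 0 = t + ((l.take (k + 1)).map get_visit_length).sum := by
  induction l generalizing t k with
  | nil => simp at hk
  | cons h tl ih =>
    cases k with
    | zero => simp [pvPartials]
    | succ k =>
      simp only [pvPartials, List.getD_cons_succ, List.take_succ_cons, List.map_cons,
        List.sum_cons]
      rw [ih _ k (by simpa using hk)]
      ring

theorem prefix_getD (l : List (Int × Int)) (k : Nat) (hk : k ≤ l.length) :
    ((0 : Int) :: pvPartials l 0).getD k 0 = ((l.take k).map get_visit_length).sum := by
  cases k with
  | zero => simp
  | succ k =>
    rw [List.getD_cons_succ, partials_getD l 0 k (by omega)]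
    simp

-- on a start-sorted list, take (bisectLeft starts x) is exactly the visits with start < x
theorem take_bisect_eq_filter (l : List (Int × Int))
    (hs : (l.map (fun (v : Int × Int) => v.1)).Pairwise (· ≤ ·)) (x : Int) :
    l.take (PySem.List.bisectLeft (l.map (fun (v : Int × Int) => v.1)) x)
      = l.filter (fun p => decide (p.1 < x)) := by
  obtain ⟨hle, hlt, hge⟩ := PySem.List.bisectLeft_spec (l.map (fun (v : Int × Int) => v.1)) x hs
  set i := PySem.List.bisectLeft (l.map (fun (v : Int × Int) => v.1)) x with hi
  rw [List.length_map] at hle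
  have h1 : (l.take i).filter (fun p => decide (p.1 < x)) = l.take i := by
    apply List.filter_eq_self.mpr
    intro a ha
    obtain ⟨j, hj, rfl⟩ := List.mem_iff_getElem.mp ha
    have hjl : j < l.length := by
      have := hj; rw [List.length_take] at this; omega
    have hji : j < i := by
      have := hj; rw [List.length_take] at this; omega
    have := hlt j (by simpa using hjl) hji
    rw [List.getElem_map] at this
    simp [List.getElem_take, this]
  have h2 : (l.drop i).filter (fun p => decide (p.1 < x)) = [] := by
    apply List.filter_eq_nil_iff.mpr
    intro a ha
    obtain ⟨j, hj, rfl⟩ := List.mem_iff_getElem.mp ha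
    have hjl : i + j < l.length := by
      have := hj; rw [List.length_drop] at this; omega
    have := hge (i + j) (by simpa using hjl) (by omega)
    rw [List.getElem_map] at this
    simp [List.getElem_drop, this]
    try omega
  conv_rhs => rw [← List.take_append_drop i l, List.filter_append, h1, h2, List.append_nil]

-- splitting the strict-lower filter at the window boundary
theorem sum_split (s : Int) (l : List (Int × Int)) :
    ((l.filter (fun p => decide (p.1 < s))).map get_visit_length).sum
      = ((l.filter (fun p => decide (p.1 < s - schengen_constraint + 1))).map get_visit_length).sum
        + ((l.filter (fun p => decide (s - schengen_constraint < p.1 ∧ p.1 < s))).map get_visit_length).sum := by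
  induction l with
  | nil => simp
  | cons h t ih =>
    simp only [List.filter_cons]
    rcases hb0 : decide (h.1 < s) with _ | _ <;>
      rcases hb1 : decide (h.1 < s - schengen_constraint + 1) with _ | _ <;>
        rcases hb2 : decide (s - schengen_constraint < h.1 ∧ h.1 < s) with _ | _ <;>
          simp only [decide_eq_true_eq, decide_eq_false_iff_not, schengen_constraint]
            at hb0 hb1 hb2 <;>
          first
            | (exfalso; omega)
            | (simp [ih, schengen_constraint]; try ring)

-- per-visit agreement of the two values
theorem per_visit (visits : List (Int × Int)) (v : Int × Int) :
    ((PySem.List.sorted visits (fun (v : Int × Int) => v.1)).foldl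
        (fun (acc : List Int × Int) v =>
          (acc.1 ++ [acc.2 + (v.2 - v.1 + 1)], acc.2 + (v.2 - v.1 + 1))) ([0], 0)).1.getD
      (PySem.List.bisectLeft ((PySem.List.sorted visits (fun (v : Int × Int) => v.1)).map (fun (v : Int × Int) => v.1)) v.1) 0 -
      (((PySem.List.sorted visits (fun (v : Int × Int) => v.1)).foldl
        (fun (acc : List Int × Int) v =>
          (acc.1 ++ [acc.2 + (v.2 - v.1 + 1)], acc.2 + (v.2 - v.1 + 1))) ([0], 0)).1.getD
      (PySem.List.bisectLeft ((PySem.List.sorted visits (fun (v : Int × Int) => v.1)).map (fun (v : Int × Int) => v.1)) (v.1 - schengen_constraint + 1)) 0) +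
      (v.2 - v.1 + 1)
    = visits.foldl (fun d pv =>
        if v.1 - schengen_constraint < pv.1 ∧ pv.1 < v.1 then d + get_visit_length pv else d) 0
      + get_visit_length v := by
  set ordered := PySem.List.sorted visits (fun (v : Int × Int) => v.1) with hord
  have hperm : ordered.Perm visits := PySem.List.sorted_perm _ _ _
  have hpw : (ordered.map (fun (v : Int × Int) => v.1)).Pairwise (· ≤ ·) := by
    apply List.pairwise_map.mpr
    exact PySem.List.sorted_pairwise visits (fun (v : Int × Int) => v.1)
  have hb1 := PySem.List.bisectLeft_spec (ordered.map (fun (v : Int × Int) => v.1)) v.1 hpw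
  have hb2 := PySem.List.bisectLeft_spec (ordered.map (fun (v : Int × Int) => v.1)) (v.1 - schengen_constraint + 1) hpw
  rw [foldl_prefix]
  have h1 : PySem.List.bisectLeft (ordered.map (fun (v : Int × Int) => v.1)) v.1 ≤ ordered.length := by
    simpa using hb1.1
  have h2 : PySem.List.bisectLeft (ordered.map (fun (v : Int × Int) => v.1)) (v.1 - schengen_constraint + 1) ≤ ordered.length := by
    simpa using hb2.1
  rw [show ([(0 : Int)] ++ pvPartials ordered 0) = ((0 : Int) :: pvPartials ordered 0) from rfl]
  rw [prefix_getD _ _ h1, prefix_getD _ _ h2]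
  rw [take_bisect_eq_filter ordered hpw v.1,
      take_bisect_eq_filter ordered hpw (v.1 - schengen_constraint + 1)]
  rw [pv_inner_sum]
  have hfq : ((ordered.filter (fun p => decide (v.1 - schengen_constraint < p.1 ∧ p.1 < v.1))).map get_visit_length).sum
      = ((visits.filter (fun p => decide (v.1 - schengen_constraint < p.1 ∧ p.1 < v.1))).map get_visit_length).sum :=
    ((hperm.filter _).map _).sum_eq
  rw [← hfq, sum_split v.1 ordered]
  simp only [get_visit_length]
  ring

-- ===== VERDICT (by name: the statement is the Claim_ definition above) =====
theorem calc_days_for_visits_spec : Claim_equal_calc_days_for_visits := by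
  intro visits _
  unfold Spec_calc_days_for_visits
  rw [calcA_eq, calcB_eq]
  rw [PySem.List.foldl_append_singleton_eq_map, PySem.List.foldl_append_singleton_eq_map]
  simp only [List.nil_append]
  apply List.map_congr_left
  intro v _
  exact (per_visit visits v).symm
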